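-- pv_equiv track=rewrite | github.com/mrveiss/AutoBot-AI | archives/code/tests/tests-legacy-2025-01-09/run_quick_infrastructure_assessment.py | _get_immediate_actions
-- ===== SOURCE A (Python) =====
-- def _get_immediate_actions(critical_issues):
--     """Get immediate actions based on critical issues"""
--     actions = []
--
--     connectivity_issues = [i for i in critical_issues if i['type'] == 'connectivity']
--     service_issues = [i for i in critical_issues if i['type'] == 'service']
--     api_issues = [i for i in critical_issues if i['type'] == 'api']
--
--     if connectivity_issues:
--         actions.append(f"Fix VM connectivity issues: {', '.join([i['component'] for i in connectivity_issues[:3]])}")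
--
--     if service_issues:
--         actions.append(f"Restart failed services: {', '.join([i['component'] for i in service_issues[:3]])}")
--
--     if api_issues:
--         actions.append(f"Investigate API failures: {', '.join([i['component'] for i in api_issues[:3]])}")
--
--     if not actions:
--         actions.append("System is operational - proceed with Week 2 objectives")
--
--     return actions
-- ===== SOURCE B (Python) =====
-- def _get_immediate_actions(critical_issues):
--     """Get immediate actions based on critical issues"""
--     groups = {}
--     for i in critical_issues:
--         groups.setdefault(i['type'], []).append(i)
--     templates = [
--         ('connectivity', 'Fix VM connectivity issues: '),
--         ('service', 'Restart failed services: '),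
--         ('api', 'Investigate API failures: '),
--     ]
--     actions = [
--         prefix + ', '.join(i['component'] for i in groups[t][:3])
--         for t, prefix in templates
--         if groups.get(t)
--     ]
--     return actions or ["System is operational - proceed with Week 2 objectives"]
-- ===== Notes on version B (the rewrite author's own statement) =====
-- stated objective: simpler
-- what changed: Replaced the three separate full-list comprehensions and three copy-pasted if/append blocks with a single grouping pass into a dict plus one config-driven loop over (type, message-prefix) templates.
import Mathlib
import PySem

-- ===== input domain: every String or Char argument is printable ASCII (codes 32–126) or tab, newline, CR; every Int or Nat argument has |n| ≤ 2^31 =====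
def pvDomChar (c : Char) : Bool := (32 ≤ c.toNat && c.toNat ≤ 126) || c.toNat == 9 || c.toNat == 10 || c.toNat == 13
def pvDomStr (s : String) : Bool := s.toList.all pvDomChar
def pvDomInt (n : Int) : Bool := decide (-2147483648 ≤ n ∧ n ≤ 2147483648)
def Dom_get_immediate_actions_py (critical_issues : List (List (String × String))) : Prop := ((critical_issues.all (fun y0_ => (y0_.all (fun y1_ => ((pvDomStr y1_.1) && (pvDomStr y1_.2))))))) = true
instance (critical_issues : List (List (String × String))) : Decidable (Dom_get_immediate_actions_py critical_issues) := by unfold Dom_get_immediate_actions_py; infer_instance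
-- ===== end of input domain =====

-- ===== PORT A =====
-- Python dict access i['type'] / i['component']: association list via PySem.Dict.mk; 'component'
-- is read through getD "" — exact under Pre_, which guarantees the key is present where A reads it.
def pvType (i : List (String × String)) : Option String := (PySem.Dict.mk i).get? "type"

def pvComp (i : List (String × String)) : String := ((PySem.Dict.mk i).get? "component").getD ""

def get_immediate_actions_py (critical_issues : List (List (String × String))) : List String :=
  let actions : List String := []
  let connectivity_issues := critical_issues.filter (fun i => pvType i == some "connectivity")
  let service_issues := critical_issues.filter (fun i => pvType i == some "service")
  let api_issues := critical_issues.filter (fun i => pvType i == some "api")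
  let actions := if ¬ connectivity_issues.isEmpty then
      actions ++ ["Fix VM connectivity issues: " ++
        PySem.Str.join ", " ((PySem.List.slice connectivity_issues none (some 3)).map pvComp)]
    else actions
  let actions := if ¬ service_issues.isEmpty then
      actions ++ ["Restart failed services: " ++
        PySem.Str.join ", " ((PySem.List.slice service_issues none (some 3)).map pvComp)]
    else actions
  let actions := if ¬ api_issues.isEmpty then
      actions ++ ["Investigate API failures: " ++
        PySem.Str.join ", " ((PySem.List.slice api_issues none (some 3)).map pvComp)]
    else actions
  if actions.isEmpty then actions ++ ["System is operational - proceed with Week 2 objectives"]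
  else actions

-- ===== PORT B =====
-- B: one grouping pass (dict type -> issues in order), then a config-driven loop over templates.
def pvGroups (critical_issues : List (List (String × String))) :
    PySem.Dict (Option String) (List (List (String × String))) :=
  (critical_issues.map (fun i => (pvType i, i))).foldl
    (fun d p => d.modify p.1 [] (· ++ [p.2])) PySem.Dict.empty

def pvTemplates : List (Option String × String) :=
  [(some "connectivity", "Fix VM connectivity issues: "),
   (some "service", "Restart failed services: "),
   (some "api", "Investigate API failures: ")]

def get_immediate_actions_py_alt (critical_issues : List (List (String × String))) : List String :=
  let groups := pvGroups critical_issues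
  let actions :=
    (pvTemplates.filter (fun p => ¬ (groups.getD p.1 []).isEmpty)).map
      (fun p => p.2 ++
        PySem.Str.join ", " ((PySem.List.slice (groups.getD p.1 []) none (some 3)).map pvComp))
  if actions.isEmpty then ["System is operational - proceed with Week 2 objectives"] else actions

-- ===== PRECONDITION & SPEC =====
-- Pre_ excludes exactly the inputs where the Python A raises KeyError: an issue without a 'type'
-- key, or an issue without a 'component' key among the first 3 of a reported type's group.
def Pre_get_immediate_actions_py (critical_issues : List (List (String × String))) : Prop :=
  (∀ i ∈ critical_issues, ((PySem.Dict.mk i).get? "type").isSome) ∧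
  (∀ t ∈ (["connectivity", "service", "api"] : List String),
    ∀ i ∈ (critical_issues.filter (fun i => (PySem.Dict.mk i).get? "type" == some t)).take 3,
      ((PySem.Dict.mk i).get? "component").isSome)

instance (critical_issues : List (List (String × String))) : Decidable (Pre_get_immediate_actions_py critical_issues) := by unfold Pre_get_immediate_actions_py; infer_instance

def pvWitness_get_immediate_actions_py : (List (List (String × String))) :=
  [[("type", "connectivity"), ("component", "vm1")], [("type", "service"), ("component", "redis")]]

-- (Spec below)
def Spec_get_immediate_actions_py (critical_issues : List (List (String × String))) (out : List String) : Prop := out = get_immediate_actions_py_alt critical_issues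
instance (critical_issues : List (List (String × String))) (out : List String) : Decidable (Spec_get_immediate_actions_py critical_issues out) := by unfold Spec_get_immediate_actions_py; infer_instance

-- ===== CLAIM (what is proved, stated in full; the proofs are below) =====
def Claim_equal_get_immediate_actions_py : Prop := ∀ (critical_issues : List (List (String × String))), Dom_get_immediate_actions_py critical_issues → Pre_get_immediate_actions_py critical_issues → Spec_get_immediate_actions_py critical_issues (get_immediate_actions_py critical_issues)

-- ===== LEMMAS AND PROOFS =====
lemma pvGroups_getD (cs : List (List (String × String))) (t : Option String) :
    (pvGroups cs).getD t [] = cs.filter (fun i => pvType i == t) := by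
  unfold pvGroups
  rw [PySem.Dict.getD_foldl_modify_append]
  simp only [List.filter_map]
  rw [List.map_map]
  simp [Function.comp_def]

-- ===== VERDICT (by name: the statement is the Claim_ definition above) =====
theorem get_immediate_actions_py_spec : Claim_equal_get_immediate_actions_py := by
  intro cs _ _
  unfold Spec_get_immediate_actions_py get_immediate_actions_py get_immediate_actions_py_alt
  simp only [pvTemplates, List.filter, pvGroups_getD]
  by_cases hc : (cs.filter (fun i => pvType i == some "connectivity")).isEmpty <;>
  by_cases hs : (cs.filter (fun i => pvType i == some "service")).isEmpty <;>
  by_cases ha : (cs.filter (fun i => pvType i == some "api")).isEmpty <;>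
  simp [hc, hs, ha]
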